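-- pv_equiv track=rewrite | github.com/difame/psp | car/Cstool.py | isRevImage
-- ===== SOURCE A (Python) =====
-- def isRevImage(img):
-- 	count = dict()
-- 	for r in range(0, len(img)):
-- 		for c in range(0, len(img[r])):
-- 			v = img[r][c]
-- 			if v not in count:
-- 				count[v] = 0
-- 			count[v] = count[v] + 1
-- 	if  len(count) < 2:
-- 		return False
-- 	scount = sorted(count.items(), key=lambda t : t[1],  reverse=True)
-- 	return(scount[0][0] > scount[1][0])
-- ===== SOURCE B (Python) =====
-- def isRevImage(img):
-- 	count = {}
-- 	for row in img:
-- 		for v in row: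
-- 			count[v] = count.get(v, 0) + 1
-- 	if len(count) < 2:
-- 		return False
-- 	# top-2 selection in one pass instead of a full sort: `top` holds up to two
-- 	# leaders (key, count), best first; strict '>' keeps earlier-inserted keys on
-- 	# count ties, exactly like the stable descending sort.
-- 	top = []
-- 	for k, c in count.items():
-- 		if not top:
-- 			top = [(k, c)]
-- 		elif c > top[0][1]:
-- 			top = [(k, c), top[0]]
-- 		elif len(top) == 1:
-- 			top = [top[0], (k, c)]
-- 		elif c > top[1][1]:
-- 			top = [top[0], (k, c)]
-- 	return top[0][0] > top[1][0]
-- ===== Notes on version B (the rewrite author's own statement) =====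
-- stated objective: alternative
-- what changed: Counting is rewritten as a direct pass over rows with dict.get, and the full stable descending sort of the items is replaced by a single-pass top-2 selection (two running leaders with strict '>' so earlier-inserted keys win count ties); then the two leader keys are compared.
import Mathlib
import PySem

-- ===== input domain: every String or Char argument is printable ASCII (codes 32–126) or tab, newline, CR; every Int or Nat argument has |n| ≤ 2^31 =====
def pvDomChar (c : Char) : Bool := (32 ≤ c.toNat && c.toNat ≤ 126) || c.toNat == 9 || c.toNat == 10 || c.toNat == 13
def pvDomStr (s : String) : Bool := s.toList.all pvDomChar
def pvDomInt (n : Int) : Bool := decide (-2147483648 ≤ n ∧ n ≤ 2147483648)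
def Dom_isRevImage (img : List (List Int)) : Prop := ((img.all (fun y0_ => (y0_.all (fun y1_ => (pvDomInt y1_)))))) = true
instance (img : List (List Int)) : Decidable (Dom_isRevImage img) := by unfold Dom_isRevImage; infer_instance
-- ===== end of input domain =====

-- B replaces the full stable sort of the count items by a one-pass top-2 selection; same return value, proved equal.

-- ===== PORT A =====
def isRevImage (img : List (List Int)) : Bool :=
  let count : PySem.Dict Int Int :=
    (PySem.List.pyRange 0 (PySem.List.len img)).foldl (fun d r =>
      let row := PySem.List.pyGetD img r []
      (PySem.List.pyRange 0 (PySem.List.len row)).foldl (fun d c =>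
        let v := PySem.List.pyGetD row c 0
        let d := if d.contains v then d else d.insert v 0
        d.insert v (d.getD v 0 + 1)) d) PySem.Dict.empty
  if count.size < 2 then false
  else
    let scount := PySem.List.sorted count.items (fun t => t.2) true
    decide ((PySem.List.pyGetD scount 0 (0, 0)).1 > (PySem.List.pyGetD scount 1 (0, 0)).1)

-- ===== PORT B =====
-- one step of B's top-2 selection loop (the body of 'for k, c in count.items()')
def altTopStep (top : List (Int × Int)) (kc : Int × Int) : List (Int × Int) :=
  match top with
  | [] => [kc]
  | t0 :: rest =>
    if t0.2 < kc.2 then [kc, t0]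
    else
      match rest with
      | [] => [t0, kc]
      | t1 :: _ => if t1.2 < kc.2 then [t0, kc] else top

def isRevImage_alt (img : List (List Int)) : Bool :=
  let count : PySem.Dict Int Int :=
    img.foldl (fun d row => row.foldl (fun d v => d.insert v (d.getD v 0 + 1)) d) PySem.Dict.empty
  if count.size < 2 then false
  else
    let top := count.items.foldl altTopStep []
    match top with
    | a :: b :: _ => decide (b.1 < a.1)
    | _ => false

-- ===== PRECONDITION & SPEC =====
def Spec_isRevImage (img : List (List Int)) (out : Bool) : Prop := out = isRevImage_alt img
instance (img : List (List Int)) (out : Bool) : Decidable (Spec_isRevImage img out) := by unfold Spec_isRevImage; infer_instance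

-- ===== CLAIM (what is proved, stated in full; the proofs are below) =====
def Claim_equal_isRevImage : Prop := ∀ (img : List (List Int)), Dom_isRevImage img → Spec_isRevImage img (isRevImage img)

-- ===== LEMMAS AND PROOFS =====

-- A's 'if v not in count: count[v] = 0; count[v] += 1' equals B's single insert
theorem pvStep_eq (d : PySem.Dict Int Int) (v : Int) :
    (if d.contains v = true then d else d.insert v 0).insert v
        ((if d.contains v = true then d else d.insert v 0).getD v 0 + 1)
      = d.insert v (d.getD v 0 + 1) := by
  by_cases h : d.contains v = true
  · simp [h]
  · simp only [Bool.not_eq_true] at h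
    simp [h, PySem.Dict.getD_insert_self, PySem.Dict.insert_insert_self,
      PySem.Dict.getD_of_not_contains d (0 : Int) h]

-- both programs build the same count dict
theorem pvCount_eq (img : List (List Int)) :
    (PySem.List.pyRange 0 (PySem.List.len img)).foldl (fun d r =>
      (PySem.List.pyRange 0 (PySem.List.len (PySem.List.pyGetD img r []))).foldl (fun d c =>
        (if d.contains (PySem.List.pyGetD (PySem.List.pyGetD img r []) c 0) = true then d
          else d.insert (PySem.List.pyGetD (PySem.List.pyGetD img r []) c 0) 0).insert
          (PySem.List.pyGetD (PySem.List.pyGetD img r []) c 0)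
          ((if d.contains (PySem.List.pyGetD (PySem.List.pyGetD img r []) c 0) = true then d
            else d.insert (PySem.List.pyGetD (PySem.List.pyGetD img r []) c 0) 0).getD
            (PySem.List.pyGetD (PySem.List.pyGetD img r []) c 0) 0 + 1)) d)
        (PySem.Dict.empty : PySem.Dict Int Int)
    = img.foldl (fun d row => row.foldl (fun d v => d.insert v (d.getD v 0 + 1)) d)
        (PySem.Dict.empty : PySem.Dict Int Int) := by
  have h1 := PySem.List.foldl_pyRange_zero_pyGetD img ([] : List Int)
      (fun d row => (PySem.List.pyRange 0 (PySem.List.len row)).foldl (fun d c =>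
        (if d.contains (PySem.List.pyGetD row c 0) = true then d
          else d.insert (PySem.List.pyGetD row c 0) 0).insert
          (PySem.List.pyGetD row c 0)
          ((if d.contains (PySem.List.pyGetD row c 0) = true then d
            else d.insert (PySem.List.pyGetD row c 0) 0).getD
            (PySem.List.pyGetD row c 0) 0 + 1)) d)
      (PySem.Dict.empty : PySem.Dict Int Int)
  beta_reduce at h1
  rw [h1]
  congr 1
  funext d row
  have h2 := PySem.List.foldl_pyRange_zero_pyGetD row (0 : Int)
      ((fun d v =>
        (if d.contains v = true then d else d.insert v 0).insert v
          ((if d.contains v = true then d else d.insert v 0).getD v 0 + 1)) :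
        PySem.Dict Int Int → Int → PySem.Dict Int Int) d
  beta_reduce at h2
  rw [h2]
  congr 1
  funext d v
  exact pvStep_eq d v

-- one insertion into the sorted accumulator, truncated to the top two, is one altTopStep
theorem pvTake2_insertBy (s : List (Int × Int)) (p : Int × Int) :
    (PySem.List.insertBy (fun a b => decide (b.2 < a.2)) p s).take 2
      = altTopStep (s.take 2) p := by
  match s with
  | [] => rfl
  | t0 :: rest =>
    simp only [PySem.List.insertBy, altTopStep]
    by_cases h0 : t0.2 < p.2
    · simp [h0]
    · simp only [h0, decide_false]
      match rest with
      | [] => simp [PySem.List.insertBy, h0]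
      | t1 :: rr =>
        by_cases h1 : t1.2 < p.2 <;>
          simp [PySem.List.insertBy, h0, h1, List.take]

-- B's loop computes the first two elements of A's sorted list
theorem pvFoldl_top2 (l : List (Int × Int)) (acc : List (Int × Int)) :
    l.foldl altTopStep (acc.take 2)
      = ((l.foldl (fun a x => PySem.List.insertBy (fun a b => decide (b.2 < a.2)) x a) acc).take 2) := by
  induction l generalizing acc with
  | nil => rfl
  | cons x xs ih =>
    simp only [List.foldl_cons]
    rw [← pvTake2_insertBy acc x, ih]

theorem pvTop_eq_sorted_take2 (l : List (Int × Int)) :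
    l.foldl altTopStep [] = (PySem.List.sorted l (fun t => t.2) true).take 2 := by
  rw [PySem.List.sorted_rev_eq_foldl_insertBy]
  exact pvFoldl_top2 l []

-- ===== VERDICT (by name: the statement is the Claim_ definition above) =====
theorem isRevImage_spec : Claim_equal_isRevImage := by
  intro img _
  unfold Spec_isRevImage
  simp only [isRevImage, isRevImage_alt]
  rw [pvCount_eq img]
  set count : PySem.Dict Int Int := img.foldl
      (fun d row => row.foldl (fun d v => d.insert v (d.getD v 0 + 1)) d)
      PySem.Dict.empty
  by_cases hs : count.size < 2
  · simp [hs]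
  · simp only [hs, if_false]
    rw [pvTop_eq_sorted_take2]
    have hlen : 2 ≤ (PySem.List.sorted count.items (fun t => t.2) true).length := by
      rw [PySem.List.length_sorted]
      have : count.size = count.items.length := rfl
      omega
    match hm : PySem.List.sorted count.items (fun t => t.2) true with
    | [] => rw [hm] at hlen; simp at hlen
    | [a] => rw [hm] at hlen; simp at hlen
    | a :: b :: t =>
      simp [PySem.List.pyGetD_ofNat']
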